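-- pv_equiv track=rewrite | github.com/CSMYang/CSC148 | csc148/stress_and_rhyme_functions.py | last_syllable
-- ===== SOURCE A (Python) =====
-- from typing import List, TextIO
--
-- def is_vowel_phoneme(phoneme: str) -> bool:
--     """Return true if the phoneme string contains vowel phoneme.
--     >>>is_vowel_phoneme('AH0')
--     True
--     >>>is_vowel_phoneme('N')
--     False
--     """
--     if len(phoneme) != 3:
--         return False
--     elif phoneme[0] not in 'AEIOU':
--         return False
--     elif not phoneme[1].isupper():
--         return False
--     elif phoneme[2] not in '012':
--         return False
--     return True
--
-- def last_syllable(list_of_phonemes: List[str]) -> List[str]: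
--     """Return the list of last vowel phoneme and the phonenes behind it of the
--     list of phonemes.
--     >>>last_syllable(['K', 'AH0', 'N', 'S', 'IH1', 'S', 'T', 'AH0', 'N', 'T'])
--     ['AH0', 'N', 'T']
--     >>>last_syllable(['B', 'AA1', 'K', 'S'])
--     [AA1', 'K', 'S']
--     """
--     list2 = list_of_phonemes[:]
--     list2.reverse()
--     list3 = []
--     for i in range(len(list2)):
--         if is_vowel_phoneme(list2[i]):
--             list3 = list2[:i + 1]
--             list3.reverse()
--             return list3
--     return []
-- ===== SOURCE B (Python) =====
-- def _is_vowel(ph):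
--     return len(ph) == 3 and ph[0] in 'AEIOU' and ph[1].isupper() and ph[2] in '012'
--
-- def last_syllable(list_of_phonemes):
--     last = -1
--     for i, ph in enumerate(list_of_phonemes):
--         if _is_vowel(ph):
--             last = i
--     return [] if last == -1 else list_of_phonemes[last:]
-- ===== Notes on version B (the rewrite author's own statement) =====
-- stated objective: simpler
-- what changed: One forward pass keeping a running last-vowel index, then a single slice, instead of reversing a copy, scanning the reversed list with an early return and reversing the sliced prefix back.
import Mathlib
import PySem

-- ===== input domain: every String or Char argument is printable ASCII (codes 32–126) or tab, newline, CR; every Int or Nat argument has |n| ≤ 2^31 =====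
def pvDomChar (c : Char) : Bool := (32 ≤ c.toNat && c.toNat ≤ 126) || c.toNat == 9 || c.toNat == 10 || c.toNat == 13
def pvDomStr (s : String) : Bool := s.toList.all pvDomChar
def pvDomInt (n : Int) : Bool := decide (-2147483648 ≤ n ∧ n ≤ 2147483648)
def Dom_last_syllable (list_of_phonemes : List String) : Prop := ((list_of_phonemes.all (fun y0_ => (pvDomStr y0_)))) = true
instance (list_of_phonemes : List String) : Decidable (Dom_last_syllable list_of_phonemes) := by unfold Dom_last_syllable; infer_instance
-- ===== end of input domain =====

-- B keeps a running last-vowel index in one forward pass and slices once, instead of A's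
-- reverse-copy, reversed scan with early return and double reverse; return values are equal.

-- ===== PORT A =====
-- is_vowel_phoneme, A's early-return chain
def pvIsVowelA (phoneme : String) : Bool :=
  if PySem.Chars.len phoneme.toList ≠ 3 then false
  else if ¬ PySem.Chars.isIn [PySem.List.pyGetD phoneme.toList 0 ' '] "AEIOU".toList then false
  else if ¬ PySem.Chars.isupper (PySem.List.pyGetD phoneme.toList 1 ' ') then false
  else if ¬ PySem.Chars.isIn [PySem.List.pyGetD phoneme.toList 2 ' '] "012".toList then false
  else true

-- A's loop over the reversed list: `pre` is the part of list2 before index i, so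
-- list2[:i+1] = pre ++ [p]; on a vowel return its reverse, at the end return [].
def pvALoop (pre : List String) : List String → List String
  | [] => []
  | p :: rest => if pvIsVowelA p then (pre ++ [p]).reverse else pvALoop (pre ++ [p]) rest

def last_syllable (list_of_phonemes : List String) : List String :=
  pvALoop [] list_of_phonemes.reverse

-- ===== PORT B =====
-- B's _is_vowel, one short-circuit conjunction
def pvIsVowelB (ph : String) : Bool :=
  PySem.Chars.len ph.toList == 3
    && PySem.Chars.isIn [PySem.List.pyGetD ph.toList 0 ' '] "AEIOU".toList
    && PySem.Chars.isupper (PySem.List.pyGetD ph.toList 1 ' ')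
    && PySem.Chars.isIn [PySem.List.pyGetD ph.toList 2 ' '] "012".toList

def last_syllable_alt (list_of_phonemes : List String) : List String :=
  let last : Int := (PySem.List.enumerate list_of_phonemes 0).foldl
    (fun acc ip => if pvIsVowelB ip.2 then ip.1 else acc) (-1)
  if last == -1 then [] else PySem.List.slice list_of_phonemes (some last) none

-- ===== PRECONDITION & SPEC =====
def Spec_last_syllable (list_of_phonemes : List String) (out : List String) : Prop := out = last_syllable_alt list_of_phonemes
instance (list_of_phonemes : List String) (out : List String) : Decidable (Spec_last_syllable list_of_phonemes out) := by unfold Spec_last_syllable; infer_instance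

-- ===== CLAIM (what is proved, stated in full; the proofs are below) =====
def Claim_equal_last_syllable : Prop := ∀ (list_of_phonemes : List String), Dom_last_syllable list_of_phonemes → Spec_last_syllable list_of_phonemes (last_syllable list_of_phonemes)

-- ===== LEMMAS AND PROOFS =====

theorem pvIsVowel_eq (p : String) : pvIsVowelA p = pvIsVowelB p := by
  simp only [pvIsVowelA, pvIsVowelB]
  split_ifs <;> simp_all

-- A's loop with an arbitrary accumulated prefix, in terms of the empty-prefix run
theorem pvALoop_pre (rest : List String) : ∀ pre : List String,
    pvALoop pre rest = if rest.any pvIsVowelA then pvALoop [] rest ++ pre.reverse else [] := by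
  induction rest with
  | nil => simp [pvALoop]
  | cons p rest ih =>
    intro pre
    by_cases hv : pvIsVowelA p
    · simp [pvALoop, hv]
    · have hcons : (p :: rest).any pvIsVowelA = rest.any pvIsVowelA := by simp [hv]
      have hstep : pvALoop [] (p :: rest) = pvALoop [p] rest := by
        rw [pvALoop, if_neg hv, List.nil_append]
      rw [show pvALoop pre (p :: rest) = pvALoop (pre ++ [p]) rest from by
            rw [pvALoop, if_neg hv],
          ih (pre ++ [p]), hcons, hstep, ih [p]]
      by_cases ha : rest.any pvIsVowelA = true
      · simp [ha, List.reverse_append]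
      · simp [ha]

-- B's running index, as a standalone function for the lemmas
def pvLastIdx (xs : List String) : Int :=
  (PySem.List.enumerate xs 0).foldl (fun acc ip => if pvIsVowelB ip.2 then ip.1 else acc) (-1)

theorem pvLastIdx_snoc (ys : List String) (p : String) :
    pvLastIdx (ys ++ [p]) = if pvIsVowelB p then (ys.length : Int) else pvLastIdx ys := by
  simp [pvLastIdx, PySem.List.enumerate_append, PySem.List.enumerate_cons,
    PySem.List.enumerate_nil, List.foldl_append]

theorem pvLastIdx_bounds (xs : List String) :
    pvLastIdx xs = -1 ∨ (0 ≤ pvLastIdx xs ∧ pvLastIdx xs < xs.length) := by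
  induction xs using List.reverseRecOn with
  | nil => left; rfl
  | append_singleton ys p ih =>
    rw [pvLastIdx_snoc]
    by_cases hv : pvIsVowelB p
    · right; simp [hv]
    · simp only [hv, List.length_append, List.length_singleton]
      rcases ih with h | h
      · left; exact h
      · right; push_cast; omega

theorem pvLastIdx_eq_neg_one_iff (xs : List String) :
    pvLastIdx xs = -1 ↔ xs.any pvIsVowelB = false := by
  induction xs using List.reverseRecOn with
  | nil => simp [pvLastIdx, PySem.List.enumerate_nil]
  | append_singleton ys p ih =>
    rw [pvLastIdx_snoc]
    by_cases hv : pvIsVowelB p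
    · simp only [hv, if_true, List.any_append, List.any_cons, List.any_nil]
      constructor
      · intro h; omega
      · simp
    · simp [hv, ih]

theorem pv_main (xs : List String) : last_syllable xs = last_syllable_alt xs := by
  have hf : pvIsVowelA = pvIsVowelB := funext fun p => pvIsVowel_eq p
  induction xs using List.reverseRecOn with
  | nil => rfl
  | append_singleton ys p ih =>
    have hB : last_syllable_alt ys =
        if pvLastIdx ys == -1 then [] else PySem.List.slice ys (some (pvLastIdx ys)) none := rfl
    rw [last_syllable, List.reverse_append, List.reverse_singleton, List.singleton_append,
      pvALoop]
    rw [show last_syllable_alt (ys ++ [p]) =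
        (if pvLastIdx (ys ++ [p]) == -1 then []
         else PySem.List.slice (ys ++ [p]) (some (pvLastIdx (ys ++ [p]))) none) from rfl]
    rw [pvLastIdx_snoc]
    by_cases hv : pvIsVowelA p
    · have hvB : pvIsVowelB p := by rw [← pvIsVowel_eq]; exact hv
      rw [if_pos hv, if_pos hvB]
      have hne : ¬ ((ys.length : Int) == -1) = true := by
        simp only [beq_iff_eq]; omega
      rw [if_neg hne, PySem.List.slice_from_natCast, List.drop_left]
      simp
    · have hvB : pvIsVowelB p = false := by rw [← pvIsVowel_eq]; simpa using hv
      rw [if_neg hv, hvB, if_neg Bool.false_ne_true, List.nil_append,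
        pvALoop_pre ys.reverse [p], List.reverse_singleton]
      have hAB : ys.any pvIsVowelA = ys.any pvIsVowelB := by rw [hf]
      rcases pvLastIdx_bounds ys with h1 | ⟨h0, hlt⟩
      · have hany : ys.any pvIsVowelB = false := (pvLastIdx_eq_neg_one_iff ys).mp h1
        have hanyA : ys.reverse.any pvIsVowelA = false := by
          rw [List.any_reverse, hAB]; exact hany
        rw [if_neg (by simp [hanyA]), if_pos (by simp [h1])]
      · have h1 : pvLastIdx ys ≠ -1 := by omega
        have hany : ys.any pvIsVowelB = true := by
          rcases Bool.eq_false_or_eq_true (ys.any pvIsVowelB) with h | h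
          · exact h
          · exact absurd ((pvLastIdx_eq_neg_one_iff ys).mpr h) h1
        have hanyA : ys.reverse.any pvIsVowelA = true := by
          rw [List.any_reverse, hAB]; exact hany
        have hne : ¬ (pvLastIdx ys == -1) = true := by simpa using h1
        rw [if_pos hanyA, if_neg hne]
        rw [show pvALoop [] ys.reverse = last_syllable ys from rfl, ih, hB, if_neg hne]
        rw [PySem.List.slice_from ys h0, PySem.List.slice_from (ys ++ [p]) h0,
          List.drop_append_of_le_length (by omega : (pvLastIdx ys).toNat ≤ ys.length)]

-- ===== VERDICT (by name: the statement is the Claim_ definition above) =====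
theorem last_syllable_spec : Claim_equal_last_syllable := by
  intro xs _
  unfold Spec_last_syllable
  exact pv_main xs
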